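-- pv_equiv track=rewrite | github.com/capsian/Lille1 | M1_ML_2020_2021/S1/ACT/TPs/4_heuristique/eval_sol.py | eval_solution
-- ===== SOURCE A (Python) =====
-- def eval_solution(tasks):
--     score = 0
--     curr_time = 0
--     for t in tasks:  # task[0]: task duration, task[1]: importance, task[2]: max wait
--         curr_time += t[0]
--         wait = max(curr_time - t[2], 0)
--         score += wait * t[1]
--     return score
-- ===== SOURCE B (Python) =====
-- def eval_solution(tasks):
--     # build the table of completion times, then reduce over it
--     cum = []
--     c = 0
--     for t in tasks:
--         c += t[0]
--         cum.append(c)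
--     return sum(max(c - t[2], 0) * t[1] for c, t in zip(cum, tasks))
-- ===== Notes on version B (the rewrite author's own statement) =====
-- stated objective: alternative
-- what changed: Replaces the single fused running-total loop by a two-phase decomposition: first build the prefix-sum table of completion times, then sum the weighted lateness over zip(cum, tasks).
import Mathlib
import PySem

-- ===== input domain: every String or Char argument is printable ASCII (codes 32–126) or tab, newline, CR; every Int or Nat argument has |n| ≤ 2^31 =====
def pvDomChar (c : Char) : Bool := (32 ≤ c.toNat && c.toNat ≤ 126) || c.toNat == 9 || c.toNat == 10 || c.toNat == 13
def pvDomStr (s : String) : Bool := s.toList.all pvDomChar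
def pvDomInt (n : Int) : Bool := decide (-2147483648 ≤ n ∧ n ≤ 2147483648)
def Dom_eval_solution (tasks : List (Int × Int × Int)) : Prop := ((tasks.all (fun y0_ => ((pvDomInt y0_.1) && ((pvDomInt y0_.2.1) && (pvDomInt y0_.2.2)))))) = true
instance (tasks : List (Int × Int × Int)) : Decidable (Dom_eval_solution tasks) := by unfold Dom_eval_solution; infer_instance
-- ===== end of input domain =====

-- B replaces A's fused running-total loop by a prefix-sum table followed by a reduce over it (alternative decomposition, same cost).

-- ===== PORT A =====
-- single loop carrying (score, curr_time)
def eval_solution (tasks : List (Int × Int × Int)) : Int :=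
  (tasks.foldl
    (fun (st : Int × Int) t =>
      let curr_time := st.2 + t.1
      let wait := max (curr_time - t.2.2) 0
      (st.1 + wait * t.2.1, curr_time))
    (0, 0)).1

-- ===== PORT B =====
-- phase 1: prefix-sum table of completion times (the loop building `cum`)
def cumTimes (c : Int) : List (Int × Int × Int) → List Int
  | [] => []
  | t :: ts => (c + t.1) :: cumTimes (c + t.1) ts

-- phase 2: sum of the weighted lateness over zip(cum, tasks)
def eval_solution_alt (tasks : List (Int × Int × Int)) : Int :=
  (((cumTimes 0 tasks).zip tasks).map
    (fun ct => max (ct.1 - ct.2.2.2) 0 * ct.2.2.1)).sum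

-- ===== PRECONDITION & SPEC =====
def Spec_eval_solution (tasks : List (Int × Int × Int)) (out : Int) : Prop := out = eval_solution_alt tasks
instance (tasks : List (Int × Int × Int)) (out : Int) : Decidable (Spec_eval_solution tasks out) := by unfold Spec_eval_solution; infer_instance

-- ===== CLAIM (what is proved, stated in full; the proofs are below) =====
def Claim_equal_eval_solution : Prop := ∀ (tasks : List (Int × Int × Int)), Dom_eval_solution tasks → Spec_eval_solution tasks (eval_solution tasks)

-- ===== LEMMAS AND PROOFS =====
theorem evalA_fold_eq (tasks : List (Int × Int × Int)) :
    ∀ (s c : Int),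
      (tasks.foldl
        (fun (st : Int × Int) t =>
          let curr_time := st.2 + t.1
          let wait := max (curr_time - t.2.2) 0
          (st.1 + wait * t.2.1, curr_time))
        (s, c)).1
      = s + (((cumTimes c tasks).zip tasks).map
          (fun ct => max (ct.1 - ct.2.2.2) 0 * ct.2.2.1)).sum := by
  induction tasks with
  | nil => intro s c; simp
  | cons t ts ih =>
      intro s c
      simp only [List.foldl, cumTimes, List.zip, List.zipWith, List.map, List.sum_cons]
      rw [ih]
      simp [List.zip]
      ring

-- ===== VERDICT (by name: the statement is the Claim_ definition above) =====
theorem eval_solution_spec : Claim_equal_eval_solution := by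
  intro tasks _
  show eval_solution tasks = eval_solution_alt tasks
  unfold eval_solution eval_solution_alt
  simpa using evalA_fold_eq tasks 0 0
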